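-- pv_equiv track=rewrite | github.com/gabkidner/CS_1030Programs | 15/pig_latin.py | way_end
-- ===== SOURCE A (Python) =====
-- END = '.,!?'
--
-- def way_end(word):
-- 	for x in word:
-- 		if x in END:
-- 			ind = word.index(x)
-- 			inde = word[ind]
-- 			word = word[0:ind]
-- 			return f'{word}way{inde}'
-- 	return f'{word}way'
-- ===== SOURCE B (Python) =====
-- END = '.,!?'
--
-- def way_end(word):
--     hits = [i for i in (word.find(p) for p in END) if i != -1]
--     if not hits:
--         return word + 'way'
--     ind = min(hits)
--     return f'{word[:ind]}way{word[ind]}'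
-- ===== Notes on version B (the rewrite author's own statement) =====
-- stated objective: faster
-- what changed: Replaces A's Python-level char-by-char scan (membership test, then .index and slice) by four library find() scans, one per punctuation mark, filtering out the -1 misses and taking the min to get the earliest punctuation index.
import Mathlib
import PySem

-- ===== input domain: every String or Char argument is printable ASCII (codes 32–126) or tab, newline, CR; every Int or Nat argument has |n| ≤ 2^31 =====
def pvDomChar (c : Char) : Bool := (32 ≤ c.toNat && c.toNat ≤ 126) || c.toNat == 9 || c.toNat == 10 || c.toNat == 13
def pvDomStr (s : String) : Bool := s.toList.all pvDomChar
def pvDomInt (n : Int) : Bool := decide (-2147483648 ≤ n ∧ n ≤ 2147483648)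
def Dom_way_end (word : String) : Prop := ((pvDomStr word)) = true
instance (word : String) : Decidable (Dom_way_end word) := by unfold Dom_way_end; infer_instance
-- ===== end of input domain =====

-- B finds the earliest punctuation index as the min of the four library find() results instead
-- of A's char-by-char scan with membership test (same O(n); measured constant-factor faster).

-- END = '.,!?'
def pvENDl : List Char := ".,!?".toList

-- ===== PORT A =====
-- the for-loop of A: 'rest' is the remainder of the iteration, 'cs' the (unreassigned) word
def wayEndGoA (cs : List Char) (rest : List Char) : List Char :=
  match rest with
  | [] => cs ++ "way".toList
  | x :: xs =>
    if PySem.Chars.isIn [x] pvENDl then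
      let ind := PySem.Chars.find cs [x]          -- word.index(x): x is present, so same as find
      let inde := (PySem.List.pyGet? cs ind).elim [] (fun c => [c])  -- word[ind] (always in range here)
      let cs' := PySem.List.slice cs (some 0) (some ind)             -- word[0:ind]
      cs' ++ "way".toList ++ inde
    else wayEndGoA cs xs

def way_end (word : String) : String := String.ofList (wayEndGoA word.toList word.toList)

-- ===== PORT B =====
def wayEndAltB (cs : List Char) : List Char :=
  let hits := (pvENDl.map (fun p => PySem.Chars.find cs [p])).filter (fun i => i ≠ -1)
  match PySem.List.min? hits (fun i => i) with
  | none => cs ++ "way".toList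
  | some ind =>
      PySem.List.slice cs (some 0) (some ind) ++ "way".toList
        ++ (PySem.List.pyGet? cs ind).elim [] (fun c => [c])

def way_end_alt (word : String) : String := String.ofList (wayEndAltB word.toList)

-- ===== PRECONDITION & SPEC =====
def Spec_way_end (word : String) (out : String) : Prop := out = way_end_alt word
instance (word : String) (out : String) : Decidable (Spec_way_end word out) := by unfold Spec_way_end; infer_instance

-- ===== CLAIM (what is proved, stated in full; the proofs are below) =====
def Claim_equal_way_end : Prop := ∀ (word : String), Dom_way_end word → Spec_way_end word (way_end word)

-- ===== LEMMAS AND PROOFS =====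

-- predicate 'c is NOT a punctuation mark', as used by takeWhile/dropWhile below
def pvQ (c : Char) : Bool := !(pvENDl.contains c)

theorem singleton_prefix_iff (l : List Char) (x : Char) : [x] <+: l ↔ l.head? = some x := by
  constructor
  · rintro ⟨t, rfl⟩; rfl
  · intro h; cases l with
    | nil => simp at h
    | cons a t => simp at h; exact h ▸ ⟨t, rfl⟩

theorem isIn_singleton (x : Char) (l : List Char) :
    PySem.Chars.isIn [x] l = (l.contains x) := by
  by_cases h : x ∈ l
  · have h1 : PySem.Chars.isIn [x] l = true := by
      rw [PySem.Chars.isIn_iff_infix, List.singleton_infix_iff]; exact h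
    simp [h1, h]
  · have h1 : PySem.Chars.isIn [x] l = false := by
      rw [PySem.Chars.isIn_eq_false_iff, List.singleton_infix_iff]; exact h
    simp [h1, h]

theorem find_singleton_eq (cs : List Char) (c : Char) (N : Nat)
    (hN : cs[N]? = some c) (hlt : ∀ i, i < N → cs[i]? ≠ some c) :
    PySem.Chars.find cs [c] = (N : Int) := by
  have hmem : c ∈ cs := List.mem_of_getElem? hN
  have hnn : 0 ≤ PySem.Chars.find cs [c] := by
    rw [PySem.Chars.find_nonneg_iff, List.singleton_infix_iff]; exact hmem
  obtain ⟨hpre, hmin⟩ := PySem.Chars.find_spec (s := cs) (sub := [c]) hnn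
  set f := PySem.Chars.find cs [c] with hf
  have hget : cs[f.toNat]? = some c := by
    rw [← List.head?_drop]; exact (singleton_prefix_iff _ _).mp hpre
  rcases lt_trichotomy f.toNat N with h | h | h
  · exact absurd hget (hlt _ h)
  · omega
  · exact absurd ((singleton_prefix_iff _ _).mpr (by rw [List.head?_drop]; exact hN)) (hmin N h)

theorem mem_takeWhile_q (cs : List Char) (c : Char) (h : c ∈ cs.takeWhile pvQ) :
    pvENDl.contains c = false := by
  have := List.mem_takeWhile_imp h
  simpa [pvQ] using this

theorem dropWhile_head_false (p : Char → Bool) (l xs : List Char) (x : Char)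
    (h : l.dropWhile p = x :: xs) : p x = false := by
  induction l with
  | nil => simp at h
  | cons a t ih =>
    rw [List.dropWhile_cons] at h
    split at h
    · exact ih h
    · next hp => cases h; simpa using hp

-- character at an index inside the punctuation-free prefix is not punctuation
theorem getElem?_prefix_not_end (T D : List Char) (hT : ∀ c ∈ T, pvENDl.contains c = false)
    (i : Nat) (hi : i < T.length) (c : Char) (h : (T ++ D)[i]? = some c) :
    pvENDl.contains c = false := by
  rw [List.getElem?_append_left hi] at h
  exact hT c (List.mem_of_getElem? h)

-- the punctuation index A returns: first index of the head of the punctuation suffix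
theorem find_head_eq (T D : List Char) (x : Char) (xs : List Char)
    (hT : ∀ c ∈ T, pvENDl.contains c = false) (hx : pvENDl.contains x = true)
    (hD : D = x :: xs) :
    PySem.Chars.find (T ++ D) [x] = (T.length : Int) := by
  subst hD
  apply find_singleton_eq
  · simp
  · intro i hi hget
    have := getElem?_prefix_not_end T (x :: xs) hT i hi x hget
    rw [this] at hx; exact absurd hx (by simp)

-- the A-side loop, with the already-scanned punctuation-free prefix 'pre' made explicit
theorem goA_spec (rest : List Char) : ∀ (pre : List Char),
    (∀ c ∈ pre, pvENDl.contains c = false) →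
    wayEndGoA (pre ++ rest) rest =
      (pre ++ rest.takeWhile pvQ) ++ "way".toList ++ (rest.dropWhile pvQ).take 1 := by
  induction rest with
  | nil => intro pre _; simp [wayEndGoA]
  | cons x xs ih =>
    intro pre hpre
    by_cases hx : pvENDl.contains x = true
    · have hq : pvQ x = false := by simp only [pvQ, hx, Bool.not_true]
      have hfind : PySem.Chars.find (pre ++ x :: xs) [x] = (pre.length : Int) :=
        find_head_eq pre (x :: xs) x xs hpre hx rfl
      have hget : PySem.List.pyGet? (pre ++ x :: xs) ((pre.length : Nat) : Int) = some x := by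
        rw [PySem.List.pyGet?_natCast]; simp
      have hslice : PySem.List.slice (pre ++ x :: xs) (some 0) (some ((pre.length : Nat) : Int))
          = pre := by
        rw [PySem.List.slice_zero_start, PySem.List.slice_to_natCast, List.take_left]
      simp only [wayEndGoA, isIn_singleton, hx, if_pos, hfind, hget, hslice,
        List.takeWhile_cons, List.dropWhile_cons, hq]
      simp
    · have hxf : pvENDl.contains x = false := by simpa using hx
      have hq : pvQ x = true := by simp only [pvQ, hxf, Bool.not_false]
      have heq : pre ++ x :: xs = (pre ++ [x]) ++ xs := by simp
      have hpre' : ∀ c ∈ pre ++ [x], pvENDl.contains c = false := by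
        intro c hc
        rcases List.mem_append.mp hc with h | h
        · exact hpre c h
        · simp at h; subst h; exact hxf
      simp only [wayEndGoA, isIn_singleton, hxf, Bool.false_eq_true, if_neg, not_false_iff]
      rw [heq, ih (pre ++ [x]) hpre']
      simp [hq]

-- the B side computes the same normal form
theorem altB_spec (cs : List Char) :
    wayEndAltB cs = cs.takeWhile pvQ ++ "way".toList ++ (cs.dropWhile pvQ).take 1 := by
  have hsplit : cs.takeWhile pvQ ++ cs.dropWhile pvQ = cs := List.takeWhile_append_dropWhile
  have hTno : ∀ c ∈ cs.takeWhile pvQ, pvENDl.contains c = false :=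
    fun c hc => mem_takeWhile_q cs c hc
  cases hD : cs.dropWhile pvQ with
  | nil =>
    have hT : cs.takeWhile pvQ = cs := by rw [hD, List.append_nil] at hsplit; exact hsplit
    have hno : ∀ c ∈ cs, pvENDl.contains c = false := by
      intro c hc; exact hTno c (by rw [hT]; exact hc)
    have hhits : ((pvENDl.map (fun p => PySem.Chars.find cs [p])).filter
        (fun i => decide (i ≠ -1))) = [] := by
      rw [List.filter_eq_nil_iff]
      intro i hi
      simp only [List.mem_map] at hi
      obtain ⟨p, hp, rfl⟩ := hi
      have hne : PySem.Chars.find cs [p] = -1 := by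
        rw [PySem.Chars.find_eq_neg_one_iff, List.singleton_infix_iff]
        intro hmem
        have := hno p hmem
        simp [List.contains_eq_mem, hp] at this
      simp [hne]
    have key : wayEndAltB cs =
        (match PySem.List.min? ((pvENDl.map (fun p => PySem.Chars.find cs [p])).filter
            (fun i => decide (i ≠ -1))) (fun i => i) with
          | none => cs ++ "way".toList
          | some ind =>
              PySem.List.slice cs (some 0) (some ind) ++ "way".toList
                ++ (PySem.List.pyGet? cs ind).elim [] (fun c => [c])) := rfl
    rw [key, hhits]
    have hnone : PySem.List.min? ([] : List Int) (fun i => i) = none := rfl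
    rw [hnone]
    simp [hT]
  | cons x xs =>
    have hcs : cs = cs.takeWhile pvQ ++ x :: xs := by rw [← hD]; exact hsplit.symm
    have hxE : pvENDl.contains x = true := by
      have := dropWhile_head_false pvQ cs xs x hD
      simpa [pvQ] using this
    have hxf : PySem.Chars.find cs [x] = ((cs.takeWhile pvQ).length : Int) := by
      conv_lhs => rw [hcs]
      exact find_head_eq _ _ x xs hTno hxE rfl
    have hmemN : (((cs.takeWhile pvQ).length : Int)) ∈
        ((pvENDl.map (fun p => PySem.Chars.find cs [p])).filter (fun i => decide (i ≠ -1))) := by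
      rw [List.mem_filter]
      constructor
      · exact List.mem_map.mpr ⟨x, by simpa [List.contains_eq_mem] using hxE, hxf⟩
      · simp
    have hlb : ∀ i ∈ ((pvENDl.map (fun p => PySem.Chars.find cs [p])).filter
        (fun i => decide (i ≠ -1))), ((cs.takeWhile pvQ).length : Int) ≤ i := by
      intro i hi
      rw [List.mem_filter] at hi
      obtain ⟨hi1, hi2⟩ := hi
      obtain ⟨p, hp, rfl⟩ := List.mem_map.mp hi1
      have hne : PySem.Chars.find cs [p] ≠ -1 := by simpa using hi2
      have hnn : 0 ≤ PySem.Chars.find cs [p] := by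
        have := PySem.Chars.neg_one_le_find (s := cs) (sub := [p])
        omega
      obtain ⟨hpre, _⟩ := PySem.Chars.find_spec (s := cs) (sub := [p]) hnn
      have hget : cs[(PySem.Chars.find cs [p]).toNat]? = some p := by
        rw [← List.head?_drop]; exact (singleton_prefix_iff _ _).mp hpre
      by_cases hle : ((cs.takeWhile pvQ).length : Int) ≤ PySem.Chars.find cs [p]
      · exact hle
      · exfalso
        have hltN : (PySem.Chars.find cs [p]).toNat < (cs.takeWhile pvQ).length := by omega
        have := getElem?_prefix_not_end (cs.takeWhile pvQ) (x :: xs) hTno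
          (PySem.Chars.find cs [p]).toNat hltN p (by rw [← hcs]; exact hget)
        simp [List.contains_eq_mem, hp] at this
    cases hmin : PySem.List.min? ((pvENDl.map (fun p => PySem.Chars.find cs [p])).filter
        (fun i => decide (i ≠ -1))) (fun i => i) with
    | none =>
      rw [PySem.List.min?_eq_none_iff] at hmin
      rw [hmin] at hmemN
      exact absurd hmemN (by simp)
    | some m =>
      have hm1 : m ∈ _ := PySem.List.min?_mem hmin
      have hm2 : ∀ y ∈ _, m ≤ y := PySem.List.min?_isMin hmin
      have hmN : m = ((cs.takeWhile pvQ).length : Int) :=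
        le_antisymm (hm2 _ hmemN) (hlb m hm1)
      have hget : PySem.List.pyGet? cs (((cs.takeWhile pvQ).length : Nat) : Int) = some x := by
        rw [PySem.List.pyGet?_natCast]
        obtain ⟨T, hTeq⟩ : ∃ T, cs.takeWhile pvQ = T := ⟨_, rfl⟩
        rw [hTeq] at hcs ⊢
        rw [hcs]
        simp
      have hslice : PySem.List.slice cs (some 0) (some (((cs.takeWhile pvQ).length : Nat) : Int))
          = cs.takeWhile pvQ := by
        rw [PySem.List.slice_zero_start, PySem.List.slice_to_natCast]
        obtain ⟨T, hTeq⟩ : ∃ T, cs.takeWhile pvQ = T := ⟨_, rfl⟩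
        rw [hTeq] at hcs ⊢
        rw [hcs]
        exact List.take_left
      have key : wayEndAltB cs =
          (match PySem.List.min? ((pvENDl.map (fun p => PySem.Chars.find cs [p])).filter
              (fun i => decide (i ≠ -1))) (fun i => i) with
            | none => cs ++ "way".toList
            | some ind =>
                PySem.List.slice cs (some 0) (some ind) ++ "way".toList
                  ++ (PySem.List.pyGet? cs ind).elim [] (fun c => [c])) := rfl
      rw [key, hmin, hmN]
      simp [hget, hslice]

theorem way_end_list (cs : List Char) : wayEndGoA cs cs = wayEndAltB cs := by
  have h := goA_spec cs [] (by simp)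
  simpa [altB_spec cs] using h

-- ===== VERDICT (by name: the statement is the Claim_ definition above) =====
theorem way_end_spec : Claim_equal_way_end := by
  intro word _
  unfold Spec_way_end way_end way_end_alt
  rw [way_end_list]
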